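-- pv_equiv track=rewrite | github.com/drakempham/Technical | test_algo.py | check_algo
-- ===== SOURCE A (Python) =====
-- from typing import List
--
-- def check_algo(side, points, k, T):
--     def flatten(point: List[int]):
--         x, y = point[0], point[1]
--         if y == 0: return x
--         if x == side: return side + y
--         if y == side: return 2*side + (side-x)
--         return 3*side + (side-y)
--
--     temp = []
--     for p in points:
--         temp.append((flatten(p), p[0], p[1]))
--     temp.sort()
--
--     n = len(temp)
--     arr = temp + temp
--
--     next_pt = [-1] * (2 * n)
--     j = 1
--     for i in range(2 * n):
--         if j <= i: j = i + 1
--         while j < 2 * n: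
--             x = arr[i][1] - arr[j][1]
--             y = arr[i][2] - arr[j][2]
--             if abs(x) + abs(y) >= T:
--                 break
--             j += 1
--         next_pt[i] = j
--
--     # find min diff
--     min_diff = 2 * n + 1
--     i_min = -1
--     for i in range(n):
--         if next_pt[i] - i < min_diff:
--             min_diff = next_pt[i] - i
--             i_min = i
--
--     if min_diff > n:
--         return False
--
--     for start in range(i_min, next_pt[i_min] + 1):
--         if start >= n: break
--         curr = start
--         for _ in range(k):
--             curr = next_pt[curr]
--             if curr >= 2 * n:
--                 break
--         if curr <= start + n:
--             return True
--
--     return False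
-- ===== SOURCE B (Python) =====
-- def check_algo(side, points, k, T):
--     def flatten(p):
--         x, y = p[0], p[1]
--         if y == 0: return x
--         if x == side: return side + y
--         if y == side: return 2*side + (side - x)
--         return 3*side + (side - y)
--
--     temp = sorted((flatten(p), p[0], p[1]) for p in points)
--     n = len(temp)
--     arr = temp + temp
--     m = 2 * n
--
--     next_pt = [0] * m
--     j = 1
--     for i in range(m):
--         if j <= i: j = i + 1
--         while j < m and abs(arr[i][1] - arr[j][1]) + abs(arr[i][2] - arr[j][2]) < T:
--             j += 1
--         next_pt[i] = j
--
--     if n == 0: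
--         return False
--     i_min = min(range(n), key=lambda i: next_pt[i] - i)
--     if next_pt[i_min] - i_min > n:
--         return False
--
--     # binary lifting on the next_pt functional graph, absorbing state m
--     jump = next_pt + [m]
--     starts = list(range(i_min, min(next_pt[i_min] + 1, n)))
--     currs = starts[:]
--     kk = k
--     while kk > 0:
--         if kk & 1:
--             currs = [jump[c] for c in currs]
--         jump = [jump[jump[c]] for c in range(m + 1)]
--         kk >>= 1
--     return any(c <= s + n for s, c in zip(starts, currs))
-- ===== Notes on version B (the rewrite author's own statement) =====
-- stated objective: alternative
-- what changed: B answers the k-hop reachability queries by binary lifting (repeated squaring of the next_pt jump table with an absorbing state) instead of A's per-start step-by-step simulation with an early break, and replaces A's hand-rolled sentinel argmin scan and early-return start loop by min-with-key and any.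
import Mathlib
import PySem

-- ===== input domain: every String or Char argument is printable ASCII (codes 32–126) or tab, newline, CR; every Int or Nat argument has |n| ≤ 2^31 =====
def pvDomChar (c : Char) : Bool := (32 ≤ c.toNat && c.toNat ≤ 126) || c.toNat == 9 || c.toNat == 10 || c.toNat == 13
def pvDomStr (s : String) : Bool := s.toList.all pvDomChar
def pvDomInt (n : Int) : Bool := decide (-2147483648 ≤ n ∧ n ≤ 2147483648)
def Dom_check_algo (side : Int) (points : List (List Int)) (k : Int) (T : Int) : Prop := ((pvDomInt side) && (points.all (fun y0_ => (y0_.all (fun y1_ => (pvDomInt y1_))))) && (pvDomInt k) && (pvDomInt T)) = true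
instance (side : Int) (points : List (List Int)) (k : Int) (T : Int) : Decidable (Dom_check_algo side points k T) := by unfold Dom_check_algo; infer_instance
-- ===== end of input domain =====

-- B replaces A's per-start step-by-step simulation of the k hops by binary lifting (repeated
-- squaring of the next_pt jump table) and A's hand-rolled argmin/early-exit scans by min-with-key
-- and any; objective: alternative (not measured faster).

-- ===== PORT A =====
-- shared helper: the nested 'flatten' (identical in both Python sources)
def pvFlat (side : Int) (p : List Int) : Int :=
  let x := PySem.List.pyGetD p 0 0
  let y := PySem.List.pyGetD p 1 0
  if y = 0 then x
  else if x = side then side + y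
  else if y = side then 2*side + (side - x)
  else 3*side + (side - y)

-- shared helper: Python's lexicographic '<' on int triples
def pvLexLt (a b : Int × Int × Int) : Bool :=
  decide (a.1 < b.1) || (decide (a.1 = b.1) &&
    (decide (a.2.1 < b.2.1) || (decide (a.2.1 = b.2.1) && decide (a.2.2 < b.2.2))))

-- shared helper: Python's stable sort of int triples (insertion sort, exactly PySem.List.sorted's
-- scheme, cf. PySem.List.sorted_eq_foldl_insertBy; both sources sort the same triples)
def pvSortTriples (xs : List (Int × Int × Int)) : List (Int × Int × Int) :=
  xs.foldl (fun acc x => PySem.List.insertBy pvLexLt x acc) []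

-- shared helper: 'abs(xi-xj) + abs(yi-yj) >= T'
def pvDistGE (a b : Int × Int × Int) (T : Int) : Bool :=
  decide (T ≤ (((a.2.1 - b.2.1).natAbs : Int) + ((a.2.2 - b.2.2).natAbs : Int)))

-- A's inner while: 'while j < 2n: …; if dist >= T: break; j += 1' (fuel ≥ arr.length suffices)
def pvAdvA (arr : List (Int × Int × Int)) (T : Int) (a : Int × Int × Int) : Nat → Nat → Nat
  | 0, j => j
  | f+1, j =>
    if j < arr.length then
      if pvDistGE a (arr.getD j (0,0,0)) T then j
      else pvAdvA arr T a f (j+1)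
    else j

-- A's next_pt loop: persistent j, one entry appended per i
def pvNextA (arr : List (Int × Int × Int)) (T : Int) : List Nat :=
  ((List.range arr.length).foldl (fun (st : Nat × List Nat) i =>
      let j0 := if st.1 ≤ i then i+1 else st.1
      let j := pvAdvA arr T (arr.getD i (0,0,0)) arr.length j0
      (j, st.2 ++ [j])) (1, [])).2

-- A's 'for _ in range(k): curr = next_pt[curr]; if curr >= 2n: break'
def pvIterA (next : List Nat) (m : Nat) : Nat → Nat → Nat
  | 0, c => c
  | f+1, c =>
    let c' := next.getD c 0
    if m ≤ c' then c' else pvIterA next m f c'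

-- A's start loop with its 'if start >= n: break' and early return True
def pvStartsA (next : List Nat) (n m k : Nat) : List Nat → Bool
  | [] => false
  | s :: rest =>
    if n ≤ s then false
    else if pvIterA next m k s ≤ s + n then true
    else pvStartsA next n m k rest

def check_algo (side : Int) (points : List (List Int)) (k : Int) (T : Int) : Bool :=
  let temp := pvSortTriples (points.foldl (fun acc p =>
      acc ++ [(pvFlat side p, PySem.List.pyGetD p 0 0, PySem.List.pyGetD p 1 0)]) [])
  let n := temp.length
  let arr := temp ++ temp
  let next := pvNextA arr T
  let r := (List.range n).foldl (fun (st : Int × Int) i =>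
      if ((next.getD i 0 : Int) - (i : Int)) < st.1 then (((next.getD i 0 : Int) - (i : Int)), (i : Int)) else st)
      (2*(n : Int) + 1, -1)
  if r.1 > (n : Int) then false
  else
    let i0 := r.2.toNat
    pvStartsA next n (2*n) k.toNat (List.range' i0 (next.getD i0 0 + 1 - i0))

-- ===== PORT B =====
-- B's inner while with the combined condition 'j < m and dist < T'
def pvAdvB (arr : List (Int × Int × Int)) (T : Int) (a : Int × Int × Int) : Nat → Nat → Nat
  | 0, j => j
  | f+1, j =>
    if decide (j < arr.length) && !pvDistGE a (arr.getD j (0,0,0)) T then pvAdvB arr T a f (j+1)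
    else j

def pvNextB (arr : List (Int × Int × Int)) (T : Int) : List Nat :=
  ((List.range arr.length).foldl (fun (st : Nat × List Nat) i =>
      let j0 := if st.1 ≤ i then i+1 else st.1
      let j := pvAdvB arr T (arr.getD i (0,0,0)) arr.length j0
      (j, st.2 ++ [j])) (1, [])).2

-- 'jump = [jump[jump[c]] for c in range(m+1)]'
def pvSquare (jump : List Nat) : List Nat :=
  (List.range jump.length).map (fun c => jump.getD (jump.getD c 0) 0)

-- B's 'while kk > 0' binary-lifting loop
def pvLift (jump currs : List Nat) (k : Nat) : List Nat :=
  if k = 0 then currs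
  else pvLift (pvSquare jump)
      (if k % 2 = 1 then currs.map (fun c => jump.getD c 0) else currs) (k / 2)
  termination_by k
  decreasing_by exact Nat.div_lt_self (Nat.pos_of_ne_zero (by assumption)) one_lt_two

def check_algo_alt (side : Int) (points : List (List Int)) (k : Int) (T : Int) : Bool :=
  let temp := pvSortTriples (points.map (fun p =>
      (pvFlat side p, PySem.List.pyGetD p 0 0, PySem.List.pyGetD p 1 0)))
  let n := temp.length
  let arr := temp ++ temp
  let m := 2*n
  let next := pvNextB arr T
  if n = 0 then false
  else
    match PySem.List.min? (List.range n) (fun i => (next.getD i 0 : Int) - (i : Int)) with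
    | none => false
    | some i0 =>
      if ((next.getD i0 0 : Int) - (i0 : Int)) > (n : Int) then false
      else
        let jump := next ++ [m]
        let starts := List.range' i0 (min (next.getD i0 0 + 1) n - i0)
        let currs := pvLift jump starts k.toNat
        (starts.zip currs).any (fun sc => sc.2 ≤ sc.1 + n)

-- ===== PRECONDITION & SPEC =====
-- Pre_ excludes exactly the inputs on which A raises IndexError: a point list with fewer than two coordinates.
def Pre_check_algo (side : Int) (points : List (List Int)) (k : Int) (T : Int) : Prop :=
  ∀ p ∈ points, 2 ≤ p.length
instance (side : Int) (points : List (List Int)) (k : Int) (T : Int) : Decidable (Pre_check_algo side points k T) := by unfold Pre_check_algo; infer_instance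
def pvWitness_check_algo : Int × List (List Int) × Int × Int := (4, [[0, 0], [4, 2], [1, 4]], 2, 3)

def Spec_check_algo (side : Int) (points : List (List Int)) (k : Int) (T : Int) (out : Bool) : Prop := out = check_algo_alt side points k T
instance (side : Int) (points : List (List Int)) (k : Int) (T : Int) (out : Bool) : Decidable (Spec_check_algo side points k T out) := by unfold Spec_check_algo; infer_instance

-- ===== CLAIM (what is proved, stated in full; the proofs are below) =====
def Claim_equal_check_algo : Prop := ∀ (side : Int) (points : List (List Int)) (k : Int) (T : Int), Dom_check_algo side points k T → Pre_check_algo side points k T → Spec_check_algo side points k T (check_algo side points k T)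

-- ===== LEMMAS AND PROOFS =====

theorem pv_adv_eq (arr : List (Int × Int × Int)) (T : Int) (a : Int × Int × Int) :
    ∀ f j, pvAdvA arr T a f j = pvAdvB arr T a f j := by
  intro f
  induction f with
  | zero => intro j; rfl
  | succ f ih =>
    intro j
    simp only [pvAdvA, pvAdvB]
    by_cases hj : j < arr.length
    · rw [List.getD_eq_getElem _ _ hj]
      cases hd : pvDistGE a (arr[j]) T <;> simp [hj, hd, ih]
    · simp [hj]

theorem pv_next_eq (arr : List (Int × Int × Int)) (T : Int) : pvNextA arr T = pvNextB arr T := by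
  unfold pvNextA pvNextB
  simp only [pv_adv_eq]

theorem pv_foldl_append_map (g : List Int → Int × Int × Int) :
    ∀ (l : List (List Int)) (acc : List (Int × Int × Int)),
      l.foldl (fun acc p => acc ++ [g p]) acc = acc ++ l.map g := by
  intro l
  induction l with
  | nil => intro acc; simp
  | cons x t ih => intro acc; simp [List.foldl_cons, ih]

-- ---- next_pt invariants ----

theorem pv_advB_le (arr : List (Int × Int × Int)) (T : Int) (a : Int × Int × Int) :
    ∀ f j, j ≤ arr.length → pvAdvB arr T a f j ≤ arr.length := by
  intro f
  induction f with
  | zero => intro j hj; exact hj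
  | succ f ih =>
    intro j hj
    simp only [pvAdvB]
    split
    · rename_i h
      have hjl : j < arr.length := by
        have := (Bool.and_eq_true _ _).mp h |>.1
        exact of_decide_eq_true this
      exact ih (j+1) hjl
    · exact hj

theorem pv_next_inv (arr : List (Int × Int × Int)) (T : Int) :
    ∀ (l : List Nat) (st : Nat × List Nat),
      (∀ i ∈ l, i < arr.length) → st.1 ≤ arr.length → (∀ v ∈ st.2, v ≤ arr.length) →
      ∀ v ∈ (l.foldl (fun (st : Nat × List Nat) i =>
          let j0 := if st.1 ≤ i then i+1 else st.1
          let j := pvAdvB arr T (arr.getD i (0,0,0)) arr.length j0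
          (j, st.2 ++ [j])) st).2, v ≤ arr.length := by
  intro l
  induction l with
  | nil => intro st _ _ hacc; simpa using hacc
  | cons i t ih =>
    intro st hl hst hacc
    simp only [List.foldl_cons]
    apply ih
    · intro x hx; exact hl x (List.mem_cons_of_mem _ hx)
    · have hi : i < arr.length := hl i (List.mem_cons_self)
      apply pv_advB_le
      split <;> omega
    · intro v hv
      simp only [List.mem_append, List.mem_singleton] at hv
      rcases hv with hv | hv
      · exact hacc v hv
      · subst hv
        have hi : i < arr.length := hl i (List.mem_cons_self)
        apply pv_advB_le
        split <;> omega

theorem pv_next_len_aux (arr : List (Int × Int × Int)) (T : Int) :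
    ∀ (l : List Nat) (st : Nat × List Nat),
      ((l.foldl (fun (st : Nat × List Nat) i =>
          let j0 := if st.1 ≤ i then i+1 else st.1
          let j := pvAdvB arr T (arr.getD i (0,0,0)) arr.length j0
          (j, st.2 ++ [j])) st).2).length = st.2.length + l.length := by
  intro l
  induction l with
  | nil => intro st; simp
  | cons i t ih =>
    intro st
    simp only [List.foldl_cons]
    rw [ih]
    simp
    omega

theorem pv_next_length (arr : List (Int × Int × Int)) (T : Int) :
    (pvNextB arr T).length = arr.length := by
  unfold pvNextB
  rw [pv_next_len_aux]
  simp

theorem pv_next_closed (arr : List (Int × Int × Int)) (T : Int) :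
    ∀ v ∈ pvNextB arr T, v ≤ arr.length := by
  rcases Nat.eq_zero_or_pos arr.length with h0 | hpos
  · have : pvNextB arr T = [] := by
      have := pv_next_length arr T
      exact List.eq_nil_of_length_eq_zero (by omega)
    simp [this]
  · unfold pvNextB
    apply pv_next_inv
    · intro i hi; exact List.mem_range.mp hi
    · exact hpos
    · intro v hv; simp at hv

theorem pv_getD_le (next : List Nat) (m : Nat) (hcl : ∀ v ∈ next, v ≤ m) (i : Nat) :
    next.getD i 0 ≤ m := by
  by_cases h : i < next.length
  · rw [List.getD_eq_getElem _ _ h]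
    exact hcl _ (List.getElem_mem h)
  · rw [List.getD_eq_default _ _ (by omega)]
    omega

-- ---- argmin: A's sentinel fold vs min? ----

theorem pv_fold_best (f : Nat → Int) :
    ∀ (t : List Nat) (b : Nat),
      t.foldl (fun (st : Int × Int) i => if f i < st.1 then (f i, (i : Int)) else st) (f b, (b : Int))
      = (f (t.foldl (fun m i => if f i < f m then i else m) b),
         ((t.foldl (fun m i => if f i < f m then i else m) b : Nat) : Int)) := by
  intro t
  induction t with
  | nil => intro b; rfl
  | cons i t ih =>
    intro b
    simp only [List.foldl_cons]
    by_cases h : f i < f b <;> simp [h, ih]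

theorem pv_best_mem (f : Nat → Int) :
    ∀ (t : List Nat) (b : Nat), t.foldl (fun m i => if f i < f m then i else m) b ∈ b :: t := by
  intro t
  induction t with
  | nil => intro b; simp
  | cons i t ih =>
    intro b
    simp only [List.foldl_cons]
    by_cases h : f i < f b
    · rw [if_pos h]
      exact List.mem_cons_of_mem _ (ih i)
    · rw [if_neg h]
      rcases List.mem_cons.mp (ih b) with h1 | h1
      · rw [h1]; exact List.mem_cons_self
      · exact List.mem_cons_of_mem _ (List.mem_cons_of_mem _ h1)

theorem pv_fold_sentinel (f : Nat → Int) (M z : Int) (x : Nat) (t : List Nat) (h : f x < M) :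
    (x :: t).foldl (fun (st : Int × Int) i => if f i < st.1 then (f i, (i : Int)) else st) (M, z)
      = (f (t.foldl (fun m i => if f i < f m then i else m) x),
         ((t.foldl (fun m i => if f i < f m then i else m) x : Nat) : Int)) := by
  simp only [List.foldl_cons]
  rw [if_pos h]
  exact pv_fold_best f t x

theorem pv_min?_cons (f : Nat → Int) (x : Nat) (t : List Nat) :
    PySem.List.min? (x :: t) f = some (t.foldl (fun m i => if f i < f m then i else m) x) := by
  show List.foldl _ none (x :: t) = _
  simp only [List.foldl_cons]
  induction t generalizing x with
  | nil => rfl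
  | cons i t ih =>
    simp only [List.foldl_cons]
    by_cases h : f i < f x <;> simp [h, ih]

-- ---- A's step-by-step walk equals iterating the jump table ----

theorem pv_jump_fix (next : List Nat) (m : Nat) (hlen : next.length = m) :
    (next ++ [m]).getD m 0 = m := by
  rw [List.getD_eq_getElem?_getD, List.getElem?_append_right (by omega)]
  simp [hlen]

theorem pv_jump_left (next : List Nat) (m : Nat) (hlen : next.length = m) (s : Nat) (hs : s < m) :
    (next ++ [m]).getD s 0 = next.getD s 0 := by
  rw [List.getD_eq_getElem?_getD, List.getElem?_append_left (by omega), ← List.getD_eq_getElem?_getD]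

theorem pv_iter_eq (next : List Nat) (m : Nat) (hlen : next.length = m)
    (hcl : ∀ v ∈ next, v ≤ m) :
    ∀ f s, s < m → pvIterA next m f s = (fun c => (next ++ [m]).getD c 0)^[f] s := by
  intro f
  induction f with
  | zero => intro s _; rfl
  | succ f ih =>
    intro s hs
    simp only [pvIterA]
    rw [Function.iterate_succ_apply]
    have hleft : (next ++ [m]).getD s 0 = next.getD s 0 := pv_jump_left next m hlen s hs
    have hle : next.getD s 0 ≤ m := pv_getD_le next m hcl s
    by_cases hbr : m ≤ next.getD s 0
    · have heq : next.getD s 0 = m := by omega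
      simp only [hbr, if_true]
      rw [hleft, heq, Function.iterate_fixed (pv_jump_fix next m hlen)]
    · simp only [hbr, if_false]
      rw [ih _ (by omega), hleft]

-- ---- binary lifting equals iterating the jump table ----

theorem pv_g_lt (jump : List Nat) (hL : 1 ≤ jump.length) (hcl : ∀ v ∈ jump, v < jump.length)
    (c : Nat) : jump.getD c 0 < jump.length := by
  by_cases h : c < jump.length
  · rw [List.getD_eq_getElem _ _ h]
    exact hcl _ (List.getElem_mem h)
  · rw [List.getD_eq_default _ _ (by omega)]
    omega

theorem pv_square_length (jump : List Nat) : (pvSquare jump).length = jump.length := by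
  simp [pvSquare]

theorem pv_square_getD (jump : List Nat) (c : Nat) (hc : c < jump.length) :
    (pvSquare jump).getD c 0 = jump.getD (jump.getD c 0) 0 := by
  unfold pvSquare
  rw [List.getD_eq_getElem?_getD, List.getElem?_map, List.getElem?_range hc]
  rfl

theorem pv_square_closed (jump : List Nat) (hL : 1 ≤ jump.length)
    (hcl : ∀ v ∈ jump, v < jump.length) :
    ∀ v ∈ pvSquare jump, v < (pvSquare jump).length := by
  intro v hv
  rw [pv_square_length]
  unfold pvSquare at hv
  rcases List.mem_map.mp hv with ⟨c, _, rfl⟩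
  exact pv_g_lt jump hL hcl _

theorem pv_sq_iter (jump : List Nat) (hL : 1 ≤ jump.length)
    (hcl : ∀ v ∈ jump, v < jump.length) :
    ∀ (jn : Nat) (c : Nat), c < jump.length →
      (fun c => (pvSquare jump).getD c 0)^[jn] c = (fun c => jump.getD c 0)^[2*jn] c := by
  intro jn
  induction jn with
  | zero => intro c _; rfl
  | succ jn ih =>
    intro c hc
    rw [Function.iterate_succ_apply]
    have h2 : 2*(jn+1) = (2*jn) + 1 + 1 := by omega
    rw [h2, Function.iterate_succ_apply, Function.iterate_succ_apply]
    rw [pv_square_getD jump c hc]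
    exact ih _ (pv_g_lt jump hL hcl _)

theorem pv_lift_eq :
    ∀ (k : Nat) (jump currs : List Nat), 1 ≤ jump.length →
      (∀ v ∈ jump, v < jump.length) → (∀ c ∈ currs, c < jump.length) →
      pvLift jump currs k = currs.map (fun c => (fun c => jump.getD c 0)^[k] c) := by
  intro k
  induction k using Nat.strong_induction_on with
  | _ k ih =>
    intro jump currs hL hcl hcurrs
    rw [pvLift]
    by_cases hk : k = 0
    · subst hk; simp
    · simp only [hk, if_false]
      have hL' : 1 ≤ (pvSquare jump).length := by rw [pv_square_length]; exact hL
      have hcl' : ∀ v ∈ pvSquare jump, v < (pvSquare jump).length :=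
        pv_square_closed jump hL hcl
      have hcurrs' : ∀ c ∈ (if k % 2 = 1 then currs.map (fun c => jump.getD c 0) else currs),
          c < (pvSquare jump).length := by
        rw [pv_square_length]
        intro c hc
        split at hc
        · rcases List.mem_map.mp hc with ⟨c', _, rfl⟩
          exact pv_g_lt jump hL hcl _
        · exact hcurrs c hc
      rw [ih (k / 2) (Nat.div_lt_self (Nat.pos_of_ne_zero hk) one_lt_two) _ _ hL' hcl' hcurrs']
      have htr : ∀ c ∈ (if k % 2 = 1 then currs.map (fun c => jump.getD c 0) else currs),
          (fun c => (pvSquare jump).getD c 0)^[k/2] c = (fun c => jump.getD c 0)^[2*(k/2)] c := by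
        intro c hc
        apply pv_sq_iter jump hL hcl
        split at hc
        · rcases List.mem_map.mp hc with ⟨c', _, rfl⟩
          exact pv_g_lt jump hL hcl _
        · exact hcurrs c hc
      rw [List.map_congr_left htr]
      by_cases hodd : k % 2 = 1
      · simp only [hodd, if_true]
        rw [List.map_map]
        apply List.map_congr_left
        intro c _
        simp only [Function.comp_apply]
        rw [← Function.iterate_succ_apply]
        congr 1
        omega
      · simp only [hodd, if_false]
        apply List.map_congr_left
        intro c _
        congr 1
        omega

-- ---- A's start loop as an 'any' over the truncated start list ----

theorem pv_startsA_any (next : List Nat) (n m k : Nat) :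
    ∀ (l : List Nat), (∀ s ∈ l, s < n) →
      pvStartsA next n m k l = l.any (fun s => pvIterA next m k s ≤ s + n) := by
  intro l
  induction l with
  | nil => intro _; rfl
  | cons s t ih =>
    intro hl
    have hs : s < n := hl s List.mem_cons_self
    simp only [pvStartsA, List.any_cons]
    rw [if_neg (by omega)]
    by_cases hp : pvIterA next m k s ≤ s + n
    · simp [hp]
    · simp only [hp, if_false]
      rw [ih (fun x hx => hl x (List.mem_cons_of_mem _ hx))]
      simp [hp]

theorem pv_startsA_append (next : List Nat) (n m k : Nat) :
    ∀ (l1 : List Nat) (s0 : Nat) (l2 : List Nat), (∀ s ∈ l1, s < n) → n ≤ s0 →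
      pvStartsA next n m k (l1 ++ s0 :: l2) = l1.any (fun s => pvIterA next m k s ≤ s + n) := by
  intro l1
  induction l1 with
  | nil =>
    intro s0 l2 _ hs0
    simp only [List.nil_append, pvStartsA, List.any_nil]
    rw [if_pos hs0]
  | cons s t ih =>
    intro s0 l2 hl hs0
    have hs : s < n := hl s List.mem_cons_self
    simp only [List.cons_append, pvStartsA, List.any_cons]
    rw [if_neg (by omega)]
    by_cases hp : pvIterA next m k s ≤ s + n
    · simp [hp]
    · simp only [hp, if_false]
      rw [ih s0 l2 (fun x hx => hl x (List.mem_cons_of_mem _ hx)) hs0]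
      simp [hp]

-- ---- zip with a mapped copy ----

theorem pv_zip_self_map {β : Type} (F : Nat → β) :
    ∀ (l : List Nat), l.zip (l.map F) = l.map (fun s => (s, F s)) := by
  intro l
  induction l with
  | nil => rfl
  | cons s t ih => simp [ih]

theorem pv_any_congr {α : Type} (l : List α) (p q : α → Bool)
    (h : ∀ a ∈ l, p a = q a) : l.any p = l.any q := by
  induction l with
  | nil => rfl
  | cons a t ih =>
    simp only [List.any_cons]
    rw [h a List.mem_cons_self, ih (fun x hx => h x (List.mem_cons_of_mem _ hx))]

-- ---- the two bodies after the shared prefix (sorted triples / next_pt table) agree ----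

theorem pv_core (next : List Nat) (n kn : Nat)
    (hlen : next.length = 2*n) (hcl : ∀ v ∈ next, v ≤ 2*n) :
    (let r := (List.range n).foldl (fun (st : Int × Int) i =>
        if ((next.getD i 0 : Int) - (i : Int)) < st.1 then (((next.getD i 0 : Int) - (i : Int)), (i : Int)) else st)
        (2*(n : Int) + 1, -1)
     if r.1 > (n : Int) then false
     else pvStartsA next n (2*n) kn (List.range' r.2.toNat (next.getD r.2.toNat 0 + 1 - r.2.toNat)))
    =
    (if n = 0 then false
     else
       match PySem.List.min? (List.range n) (fun i => (next.getD i 0 : Int) - (i : Int)) with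
       | none => false
       | some i0 =>
         if ((next.getD i0 0 : Int) - (i0 : Int)) > (n : Int) then false
         else ((List.range' i0 (min (next.getD i0 0 + 1) n - i0)).zip
              (pvLift (next ++ [2*n]) (List.range' i0 (min (next.getD i0 0 + 1) n - i0)) kn)).any
              (fun sc => sc.2 ≤ sc.1 + n)) := by
  cases n with
  | zero => simp
  | succ n' =>
    have hn1 : 1 ≤ n' + 1 := by omega
    rw [List.range_succ_eq_map]
    have h0 : ((fun i : Nat => (next.getD i 0 : Int) - (i : Int)) 0) < 2*(((n'+1 : Nat)) : Int) + 1 := by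
      have := pv_getD_le next (2*(n'+1)) hcl 0
      simp only []
      push_cast
      omega
    rw [pv_fold_sentinel (fun i : Nat => (next.getD i 0 : Int) - (i : Int))
      (2*(((n'+1 : Nat)) : Int) + 1) (-1) 0 ((List.range n').map Nat.succ) h0]
    rw [pv_min?_cons (fun i : Nat => (next.getD i 0 : Int) - (i : Int)) 0 ((List.range n').map Nat.succ)]
    dsimp only
    set c := ((List.range n').map Nat.succ).foldl
        (fun m i => if ((next.getD i 0 : Int) - (i : Int)) < ((next.getD m 0 : Int) - (m : Int)) then i else m) 0 with hc
    have hcmem : c ∈ (0 : Nat) :: (List.range n').map Nat.succ :=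
      pv_best_mem (fun i => (next.getD i 0 : Int) - (i : Int)) _ 0
    have hcn : c < n' + 1 := by
      rw [← List.range_succ_eq_map] at hcmem
      exact List.mem_range.mp hcmem
    simp only [if_neg (by omega : ¬ (n' + 1 = 0))]
    by_cases hbig : ((next.getD c 0 : Int) - (c : Int)) > ((n' + 1 : Nat) : Int)
    · rw [if_pos hbig, if_pos hbig]
    · rw [if_neg hbig, if_neg hbig]
      rw [Int.toNat_natCast]
      set n := n' + 1
      set N := next.getD c 0 with hN
      have hNle : N ≤ 2*n := pv_getD_le next (2*n) hcl c
      -- B side: binary lifting = iterating the jump table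
      have hjlen : (next ++ [2*n]).length = 2*n + 1 := by simp [hlen]
      have hjcl : ∀ v ∈ next ++ [2*n], v < (next ++ [2*n]).length := by
        intro v hv
        rw [hjlen]
        rcases List.mem_append.mp hv with h | h
        · have := hcl v h; omega
        · simp at h; omega
      have hstarts : ∀ s ∈ List.range' c (min (N + 1) n - c), s < n := by
        intro s hs
        have := List.mem_range'_1.mp hs
        omega
      rw [pv_lift_eq kn (next ++ [2*n]) _ (by rw [hjlen]; omega) hjcl
        (by intro s hs; rw [hjlen]; have := hstarts s hs; omega)]
      rw [pv_zip_self_map, List.any_map]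
      -- A side: the start loop with its break = any over the truncated list
      have hA : pvStartsA next n (2*n) kn (List.range' c (N + 1 - c))
          = (List.range' c (min (N + 1) n - c)).any
              (fun s => pvIterA next (2*n) kn s ≤ s + n) := by
        by_cases hsplit : N + 1 ≤ n
        · rw [min_eq_left hsplit]
          exact pv_startsA_any next n (2*n) kn _
            (by intro s hs; have := List.mem_range'_1.mp hs; omega)
        · have hmin : min (N + 1) n = n := by omega
          rw [hmin]
          have hcnt : N + 1 - c = (n - c) + (N + 1 - n) := by omega
          have hsplitlist : List.range' c (N + 1 - c)
              = List.range' c (n - c) ++ List.range' (c + (n - c)) (N + 1 - n) := by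
            rw [hcnt, List.range'_append_1]
          obtain ⟨c2, hc2⟩ : ∃ c2, N + 1 - n = c2 + 1 := ⟨N - n, by omega⟩
          have hcn' : c + (n - c) = n := by omega
          rw [hsplitlist, hc2, hcn', List.range'_succ]
          exact pv_startsA_append next n (2*n) kn _ n _
            (by intro s hs; have := List.mem_range'_1.mp hs; omega) (le_refl n)
      rw [hA]
      apply pv_any_congr
      intro s hs
      have hsn : s < n := hstarts s hs
      rw [pv_iter_eq next (2*n) hlen hcl kn s (by omega)]
      simp

theorem pv_equal (side : Int) (points : List (List Int)) (k T : Int) :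
    check_algo side points k T = check_algo_alt side points k T := by
  simp only [check_algo, check_algo_alt, pv_foldl_append_map, List.nil_append, pv_next_eq]
  exact pv_core _ _ _
    (by rw [pv_next_length]; simp [Nat.two_mul])
    (by intro v hv
        have := pv_next_closed _ T v hv
        simpa [Nat.two_mul] using this)

theorem check_algo_spec : Claim_equal_check_algo := by
  intro side points k T _ _
  unfold Spec_check_algo
  exact pv_equal side points k T

-- ===== VERDICT (by name: the statement is the Claim_ definition above) =====
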